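-- pv_equiv track=rewrite | github.com/grapefruit-honeyblacktea/project1 | pythonpractice1.py | my_point
-- ===== SOURCE A (Python) =====
-- def my_point(x):
--     combo_score = 0
--     current_score = 0
--     for ox in x:
--         if ox == "o":
--             combo_score += 1
--         else:
--             combo_score = 0
--         current_score += combo_score
--     return current_score
-- ===== SOURCE B (Python) =====
-- def my_point(x):
--     total = 0
--     i = 0
--     n = len(x)
--     while i < n:
--         if x[i] == "o":
--             j = i
--             while j < n and x[j] == "o":
--                 j += 1
--             k = j - i
--             total += k * (k + 1) // 2
--             i = j
--         else:
--             i += 1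
--     return total
-- ===== Notes on version B (the rewrite author's own statement) =====
-- stated objective: alternative
-- what changed: B scans maximal runs of consecutive 'o' elements and adds the closed-form triangular number k*(k+1)//2 per run, instead of maintaining a per-element combo counter.
import Mathlib
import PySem

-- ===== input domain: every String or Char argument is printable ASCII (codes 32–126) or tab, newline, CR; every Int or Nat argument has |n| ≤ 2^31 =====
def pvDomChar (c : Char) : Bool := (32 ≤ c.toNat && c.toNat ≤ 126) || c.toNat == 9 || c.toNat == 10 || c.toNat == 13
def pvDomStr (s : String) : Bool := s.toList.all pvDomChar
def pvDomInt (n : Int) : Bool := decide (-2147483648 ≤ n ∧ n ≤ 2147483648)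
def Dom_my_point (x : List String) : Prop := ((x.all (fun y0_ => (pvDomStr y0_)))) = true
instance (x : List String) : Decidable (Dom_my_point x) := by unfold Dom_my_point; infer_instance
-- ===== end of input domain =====

-- B replaces A's per-element combo counter by a run scan adding the triangular number k*(k+1)//2 per maximal 'o' run (alternative decomposition, same cost).


-- ===== PORT A =====
def my_point (x : List String) : Int :=
  (x.foldl (fun (st : Int × Int) ox =>
      let combo := if ox = "o" then st.1 + 1 else 0
      (combo, st.2 + combo)) (0, 0)).2

-- ===== PORT B =====
-- inner while of Source B: k = number of consecutive "o" elements from the current position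
-- (the outer while's position i is represented by the remaining suffix x[i:])
def runLenB : List String → Nat
  | [] => 0
  | a :: t => if a = "o" then runLenB t + 1 else 0

def altLoopB : List String → Int → Int
  | [], total => total
  | a :: t, total =>
    if a = "o" then
      let k := runLenB (a :: t)
      altLoopB ((a :: t).drop k) (total + ((k * (k + 1)) / 2 : Nat))
    else
      altLoopB t total
  termination_by xs _ => xs.length
  decreasing_by
    · simp only [runLenB, if_pos ‹_›, List.drop_succ_cons]
      have := List.length_drop (i := runLenB t) (l := t)
      simp only [List.length_cons]; omega
    · simp

def my_point_alt (x : List String) : Int := altLoopB x 0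

-- ===== PRECONDITION & SPEC =====
def Spec_my_point (x : List String) (out : Int) : Prop := out = my_point_alt x
instance (x : List String) (out : Int) : Decidable (Spec_my_point x out) := by unfold Spec_my_point; infer_instance

-- ===== CLAIM (what is proved, stated in full; the proofs are below) =====
def Claim_equal_my_point : Prop := ∀ (x : List String), Dom_my_point x → Spec_my_point x (my_point x)

-- ===== LEMMAS AND PROOFS =====
theorem tri_succ (k : Nat) : ((k + 1) * (k + 2)) / 2 = (k * (k + 1)) / 2 + (k + 1) := by
  have h : (k + 1) * (k + 2) = k * (k + 1) + (k + 1) * 2 := by ring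
  rw [h, Nat.add_mul_div_right _ _ (by norm_num : 0 < 2)]

theorem altLoopB_unfold (t : List String) (s : Int) :
    altLoopB t s = altLoopB (t.drop (runLenB t)) (s + ((runLenB t * (runLenB t + 1)) / 2 : Nat)) := by
  cases t with
  | nil => simp [altLoopB, runLenB]
  | cons a t =>
    by_cases h : a = "o"
    · conv_lhs => rw [altLoopB]
      simp [h]
    · simp [altLoopB, runLenB, h]

theorem foldl_eq_altLoopB (t : List String) (c : Nat) (s : Int) :
    (t.foldl (fun (st : Int × Int) ox =>
        (if ox = "o" then st.1 + 1 else 0, st.2 + if ox = "o" then st.1 + 1 else 0)) ((c : Int), s)).2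
      = altLoopB (t.drop (runLenB t))
          (s + ((runLenB t * (runLenB t + 1)) / 2 : Nat) + (c : Int) * ((runLenB t : Nat) : Int)) := by
  induction t generalizing c s with
  | nil => simp [altLoopB, runLenB]
  | cons a t ih =>
    by_cases h : a = "o"
    · simp only [List.foldl_cons, if_pos h, runLenB, List.drop_succ_cons]
      have hc : ((c : Int) + 1) = ((c + 1 : Nat) : Int) := by push_cast; ring
      rw [hc, ih (c + 1) (s + ((c + 1 : Nat) : Int))]
      congr 1
      have ht := tri_succ (runLenB t)
      push_cast [ht]
      ring
    · have hrl : runLenB (a :: t) = 0 := by simp [runLenB, h]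
      rw [hrl]
      simp only [List.foldl_cons, if_neg h, List.drop_zero, Nat.zero_mul, Nat.zero_div,
        Nat.cast_zero, add_zero, mul_zero]
      rw [show ((0 : Int), s) = (((0 : Nat) : Int), s) from rfl, ih 0 s]
      simp only [Nat.cast_zero, zero_mul, add_zero]
      rw [← altLoopB_unfold t s]
      conv_rhs => rw [altLoopB]
      simp [h]

-- ===== VERDICT (by name: the statement is the Claim_ definition above) =====
theorem my_point_spec : Claim_equal_my_point := by
  intro x _
  unfold Spec_my_point my_point my_point_alt
  rw [altLoopB_unfold x 0]
  have h := foldl_eq_altLoopB x 0 0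
  simp only [Nat.cast_zero, zero_mul, add_zero, zero_add] at h
  simpa using h
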